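-- pv_equiv track=rewrite | github.com/ElvisRodriguez/daily_coding_problems | python/max_common_substring.py | find_common_chars
-- ===== SOURCE A (Python) =====
-- def find_common_chars(first_string, second_string):
--     # Keep track of all characters and their indices in second_string
--     # This allows for lookups in constant time
--     # We'll use the indices to make sure we avoid false multiple characters
--     character_map = {}
--     for i in range(len(second_string)):
--         char = second_string[i]
--         if char in character_map:
--             character_map[char].append(i)
--         else:
--             character_map[char] = [i]
--     common_chars = []
--     # Keeps track of where we are in second_string, again, to avoid
--     # false multiple characters
--     max_index = 0
--     for char in first_string:
--         if char in character_map: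
--             # start at -1 so that we don't accidentally omit entries
--             index = -1
--             # We want to throw out indices that we've past with max_index
--             # This will keep a count of indices to discard
--             new_starting_index = 0
--             for i in character_map[char]:
--                 if i > max_index:
--                     index = i
--                     # no need to check other indices if we've found an index
--                     # greater than max_index
--                     break
--                 else:
--                     new_starting_index += 1
--             if index > max_index:
--                 # Jump to the next index in second_string
--                 max_index = index
--                 # Remove all index values lower than max_index
--                 # We're not interested in these indices as they represent
--                 # characters not in sequence
--                 character_map[char] = character_map[char][new_starting_index:]
--                 if len(character_map[char]) == 0:
--                     # Remove a character key if it has no indices left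
--                     # This is equivalent to no longer seeing this character in
--                     # the current portion of the string
--                     del character_map[char]
--                 common_chars.append(char)
--     return ''.join(common_chars)
-- ===== SOURCE B (Python) =====
-- def find_common_chars(first_string, second_string):
--     # Single forward pass: greedily match each character of first_string at its first
--     # occurrence in second_string strictly after the previously matched index.
--     # position starts at 1, reproducing A's matching rule exactly: A's max_index
--     # starts at 0 with a strict '>' test, so index 0 of second_string never matches.
--     common_chars = []
--     position = 1
--     for char in first_string:
--         found = second_string.find(char, position)
--         if found != -1:
--             common_chars.append(char)
--             position = found + 1
--     return ''.join(common_chars)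
-- ===== Notes on version B (the rewrite author's own statement) =====
-- stated objective: faster
-- what changed: B drops A's per-character index-list dictionary (built in a first pass, then linearly scanned, sliced and re-stored per matched character) and instead does one greedy forward pass with str.find(char, position) from a moving position that starts at 1, which is exactly A's matching rule (A's max_index starts at 0 with a strict '>' test).
import Mathlib
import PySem

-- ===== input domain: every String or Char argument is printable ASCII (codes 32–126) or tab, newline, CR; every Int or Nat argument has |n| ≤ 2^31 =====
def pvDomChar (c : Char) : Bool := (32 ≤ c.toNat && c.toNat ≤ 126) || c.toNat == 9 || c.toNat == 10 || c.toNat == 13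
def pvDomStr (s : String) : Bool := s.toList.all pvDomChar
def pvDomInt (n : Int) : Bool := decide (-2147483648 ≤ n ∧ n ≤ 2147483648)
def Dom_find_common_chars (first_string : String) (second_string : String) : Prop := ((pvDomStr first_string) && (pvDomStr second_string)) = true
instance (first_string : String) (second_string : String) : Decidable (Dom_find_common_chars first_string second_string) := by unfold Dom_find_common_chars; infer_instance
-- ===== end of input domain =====

-- B replaces A's per-character index-list dictionary (with list slicing and deletion) by a single
-- forward scan with str.find from a moving position (starting at 1: A's max_index starts at 0 with a
-- strict '>' test, so index 0 of second_string never matches); same return value, measurably faster.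


-- ===== PORT A =====
-- inner 'for i in character_map[char]' loop of A: returns (index, new_starting_index)
def pvScanA : List Int → Int → Int × Int
  | [], _ => (-1, 0)
  | i :: rest, maxIndex =>
    if i > maxIndex then (i, 0)
    else
      let r := pvScanA rest maxIndex
      (r.1, r.2 + 1)

-- first loop of A: character_map[char] = list of indices of char in second_string
def pvBuildMapA (s : List Char) : PySem.Dict Char (List Int) :=
  (PySem.List.pyRange 0 s.length 1).foldl
    (fun m i =>
      let ch := PySem.List.pyGetD s i ' '   -- second_string[i]; i is always in range here
      if m.contains ch then m.modify ch [] (fun l => l ++ [i])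
      else m.insert ch [i])
    PySem.Dict.empty

-- body of A's 'for char in first_string' loop (state: character_map, common_chars, max_index)
def pvStepA (st : PySem.Dict Char (List Int) × List Char × Int) (ch : Char) :
    PySem.Dict Char (List Int) × List Char × Int :=
  let m := st.1
  let common := st.2.1
  let maxIndex := st.2.2
  if m.contains ch then
    let r := pvScanA (m.getD ch []) maxIndex
    if r.1 > maxIndex then
      let l' := PySem.List.slice (m.getD ch []) (some r.2) none
      let m' := m.insert ch l'
      let m'' := if l'.length == 0 then m'.erase ch else m'
      (m'', common ++ [ch], r.1)
    else (m, common, maxIndex)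
  else (m, common, maxIndex)

def find_common_chars (first_string : String) (second_string : String) : String :=
  let characterMap := pvBuildMapA second_string.toList
  let res := first_string.toList.foldl pvStepA (characterMap, ([], 0))
  String.ofList res.2.1   -- ''.join of a list of single characters

-- ===== PORT B =====
-- body of B's loop: match ch at the first occurrence at or after the current position
def pvStepB (sl : List Char) (st : List Char × Int) (ch : Char) : List Char × Int :=
  let found := PySem.Chars.findFrom sl [ch] st.2 none   -- second_string.find(char, position)
  if found != -1 then (st.1 ++ [ch], found + 1) else st

def find_common_chars_alt (first_string : String) (second_string : String) : String :=
  let res := first_string.toList.foldl (pvStepB second_string.toList) (([] : List Char), (1 : Int))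
  String.ofList res.1   -- ''.join of a list of single characters

-- ===== PRECONDITION & SPEC =====
def Spec_find_common_chars (first_string : String) (second_string : String) (out : String) : Prop := out = find_common_chars_alt first_string second_string
instance (first_string : String) (second_string : String) (out : String) : Decidable (Spec_find_common_chars first_string second_string out) := by unfold Spec_find_common_chars; infer_instance

-- ===== CLAIM (what is proved, stated in full; the proofs are below) =====
def Claim_equal_find_common_chars : Prop := ∀ (first_string : String) (second_string : String), Dom_find_common_chars first_string second_string → Spec_find_common_chars first_string second_string (find_common_chars first_string second_string)

-- ===== LEMMAS AND PROOFS =====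

-- positions (as Int, ascending) at which character c occurs in sl
def pvPosns (sl : List Char) (c : Char) : List Int :=
  (((PySem.List.enumerate sl 0).map Prod.swap).filter (fun q => q.1 == c)).map (·.2)

-- the common greedy loop both programs reduce to: match each char at the first
-- occurrence of it at or after position p, then continue just past the match
def pvSpecLoop (sl : List Char) : List Char → Int → List Char
  | [], _ => []
  | c :: f, p =>
    let j := PySem.Chars.findFrom sl [c] p none
    if j ≠ -1 then c :: pvSpecLoop sl f (j + 1) else pvSpecLoop sl f p

theorem pvPosns_mem (sl : List Char) (c : Char) (x : Int) :
    x ∈ pvPosns sl c ↔ ∃ k : Nat, x = (k : Int) ∧ sl[k]? = some c := by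
  simp only [pvPosns, List.mem_map, List.mem_filter, PySem.List.mem_enumerate_iff]
  constructor
  · rintro ⟨a, ⟨⟨a1, ⟨k, hk, rfl⟩, rfl⟩, hc⟩, rfl⟩
    simp only [Prod.swap_prod_mk, beq_iff_eq] at hc ⊢
    exact ⟨k, by simp, by rw [List.getElem?_eq_getElem hk, hc]⟩
  · rintro ⟨k, rfl, hk⟩
    have hlt : k < sl.length := (List.getElem?_eq_some_iff.mp hk).1
    have hv : sl[k] = c := (List.getElem?_eq_some_iff.mp hk).2
    exact ⟨(sl[k], (0 : Int) + (k : Int)), ⟨⟨((0 : Int) + (k : Int), sl[k]), ⟨k, hlt, rfl⟩, rfl⟩,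
      by simp [hv]⟩, by simp⟩

theorem pvPosns_nonneg (sl : List Char) (c : Char) (x : Int) (hx : x ∈ pvPosns sl c) : 0 ≤ x := by
  obtain ⟨k, rfl, -⟩ := (pvPosns_mem sl c x).mp hx
  positivity

theorem pvPosns_lt_len (sl : List Char) (c : Char) (x : Int) (hx : x ∈ pvPosns sl c) :
    x < (sl.length : Int) := by
  obtain ⟨k, rfl, hk⟩ := (pvPosns_mem sl c x).mp hx
  exact_mod_cast (List.getElem?_eq_some_iff.mp hk).1

theorem pvPosns_mem_of_getElem (sl : List Char) (c : Char) (k : Nat) (hk : sl[k]? = some c) :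
    (k : Int) ∈ pvPosns sl c := (pvPosns_mem sl c k).mpr ⟨k, rfl, hk⟩

theorem pvPosns_eq_nil_of_not_mem (sl : List Char) (c : Char) (hc : c ∉ sl) :
    pvPosns sl c = [] := by
  rw [List.eq_nil_iff_forall_not_mem]
  intro x hx
  obtain ⟨k, rfl, hk⟩ := (pvPosns_mem sl c x).mp hx
  exact hc (List.mem_of_getElem? hk)

theorem pvPosns_ne_nil_of_mem (sl : List Char) (c : Char) (hc : c ∈ sl) :
    pvPosns sl c ≠ [] := by
  obtain ⟨k, hk, rfl⟩ := List.mem_iff_getElem.mp hc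
  intro h
  have := pvPosns_mem_of_getElem sl sl[k] k (List.getElem?_eq_getElem hk)
  simp [h] at this

-- A's inner scan is head-of-dropWhile / length-of-takeWhile
theorem pvScanA_eq (l : List Int) (M : Int) :
    pvScanA l M = ((l.dropWhile (fun i => decide (i ≤ M))).headD (-1),
                   ((l.takeWhile (fun i => decide (i ≤ M))).length : Int)) := by
  induction l with
  | nil => rfl
  | cons i rest ih =>
    by_cases h : i > M
    · have hd : (decide (i ≤ M)) = false := decide_eq_false (by omega)
      simp [pvScanA, h, List.takeWhile_cons, hd]
    · have hd : (decide (i ≤ M)) = true := decide_eq_true (by omega)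
      simp only [pvScanA, if_neg h, ih, List.dropWhile_cons, List.takeWhile_cons, hd,
        if_pos rfl, List.length_cons, Prod.mk.injEq]
      exact ⟨rfl, by simp⟩

-- the one build-loop step is a Dict.modify
theorem pvBuildStep_eq (m : PySem.Dict Char (List Int)) (ch : Char) (i : Int) :
    (if m.contains ch then m.modify ch [] (fun l => l ++ [i]) else m.insert ch [i])
      = m.modify ch [] (fun l => l ++ [i]) := by
  by_cases h : m.contains ch
  · rw [if_pos h]
  · rw [if_neg h, PySem.Dict.modify,
      PySem.Dict.getD_of_not_contains (d := m) (d0 := ([] : List Int)) (by simpa using h)]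
    rfl

theorem pvBuildMapA_eq (sl : List Char) :
    pvBuildMapA sl = ((PySem.List.enumerate sl 0).map Prod.swap).foldl
      (fun m q => m.modify q.1 [] (fun l => l ++ [q.2])) PySem.Dict.empty := by
  unfold pvBuildMapA
  have h1 : (fun (m : PySem.Dict Char (List Int)) (i : Int) =>
      let ch := PySem.List.pyGetD sl i ' '
      if m.contains ch then m.modify ch [] (fun l => l ++ [i]) else m.insert ch [i])
      = fun m i => m.modify (PySem.List.pyGetD sl i ' ') [] (fun l => l ++ [i]) := by
    funext m i
    exact pvBuildStep_eq m (PySem.List.pyGetD sl i ' ') i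
  rw [h1]
  have h2 : PySem.List.enumerate sl 0 =
      (PySem.List.pyRange 0 (sl.length) 1).map (fun j => (j, PySem.List.pyGetD sl j ' ')) := by
    simpa using PySem.List.enumerate_eq_map_pyRange sl ' '
  rw [h2, List.map_map, List.foldl_map]
  rfl

theorem pvBuildMapA_getD (sl : List Char) (c : Char) :
    (pvBuildMapA sl).getD c [] = pvPosns sl c := by
  rw [pvBuildMapA_eq, PySem.Dict.getD_foldl_modify_append]
  simp [pvPosns]

theorem pvBuildMapA_keys (sl : List Char) : (pvBuildMapA sl).keys = PySem.Set.ofList sl := by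
  rw [pvBuildMapA_eq]
  have h3 := PySem.Dict.keys_foldl_modify_key (l := ((PySem.List.enumerate sl 0).map Prod.swap))
    (key := fun q => (q.1 : Char)) (d0 := ([] : List Int)) (f := fun _ q => fun l => l ++ [q.2])
    (d := PySem.Dict.empty)
  simp only at h3
  rw [h3, PySem.Dict.keys_empty, List.map_map]
  have h4 : List.map ((fun (q : Char × Int) => q.1) ∘ Prod.swap) (PySem.List.enumerate sl 0) = sl := by
    simp [Function.comp_def]
  rw [h4]
  rfl

theorem pvBuildMapA_contains (sl : List Char) (c : Char) :
    (pvBuildMapA sl).contains c = decide (c ∈ sl) := by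
  rw [PySem.Dict.contains_eq_decide_mem_keys, pvBuildMapA_keys]
  exact decide_eq_decide.mpr (PySem.Set.mem_ofList sl c)

-- singleton prefix and infix
theorem pvSingle_prefix (c : Char) (t : List Char) : [c] <+: t ↔ t.head? = some c := by
  cases t with
  | nil => simp
  | cons x xs => simp [List.cons_prefix_cons, eq_comm]

theorem pvSingle_infix (c : Char) (t : List Char) : [c] <:+: t ↔ c ∈ t := by
  constructor
  · intro h; exact List.singleton_sublist.mp h.sublist
  · intro h; obtain ⟨s, u, rfl⟩ := List.append_of_mem h; exact ⟨s, u, by simp⟩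

-- find? on a strictly increasing list returns the least satisfying element
theorem pvFind?_eq_some_of (l : List Int) (P : Int → Bool) (hs : l.Pairwise (· < ·)) (x : Int)
    (hx : x ∈ l) (hPx : P x = true) (hmin : ∀ y ∈ l, P y = true → x ≤ y) :
    l.find? P = some x := by
  induction l with
  | nil => cases hx
  | cons a t ih =>
    rcases List.mem_cons.mp hx with rfl | hx'
    · simp [List.find?_cons, hPx]
    · have hax : a < x := (List.pairwise_cons.mp hs).1 x hx'
      have hPa : P a = false := by
        by_contra h
        have := hmin a (List.mem_cons_self) (by simpa using h)
        omega
      simp only [List.find?_cons, hPa]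
      exact ih (List.pairwise_cons.mp hs).2 hx'
        (fun y hy hPy => hmin y (List.mem_cons_of_mem a hy) hPy)

theorem pvPosns_sorted (sl : List Char) (c : Char) : (pvPosns sl c).Pairwise (· < ·) := by
  unfold pvPosns
  apply List.Pairwise.map
  · intro a b h
    exact h
  apply List.Pairwise.filter
  apply List.Pairwise.map
  · intro a b h
    exact h
  exact PySem.List.pairwise_lt_enumerate sl 0

-- findFrom for a single character, in terms of pvPosns
theorem pvFindFrom_eq (sl : List Char) (c : Char) (p : Nat) (hp : p ≤ sl.length) :
    PySem.Chars.findFrom sl [c] (p : Int) none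
      = ((pvPosns sl c).find? (fun i => decide ((p : Int) ≤ i))).getD (-1) := by
  rw [PySem.Chars.findFrom_natCast sl [c] p hp]
  by_cases hc : c ∈ sl.drop p
  · have hnn : 0 ≤ PySem.Chars.find (sl.drop p) [c] :=
      (PySem.Chars.find_nonneg_iff _ _).mpr ((pvSingle_infix c _).mpr hc)
    obtain ⟨hpre, hminp⟩ := PySem.Chars.find_spec hnn
    set q := (PySem.Chars.find (sl.drop p) [c]).toNat with hq
    have hgetq : sl[p + q]? = some c := by
      have h6 : (sl.drop p).drop q = sl.drop (p + q) := by
        rw [List.drop_drop]; try congr 1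
        all_goals omega
      have h1 := (pvSingle_prefix c _).mp hpre
      rwa [h6, List.head?_drop] at h1
    have hmem : ((p + q : Nat) : Int) ∈ pvPosns sl c := pvPosns_mem_of_getElem sl c _ hgetq
    have hfind : (pvPosns sl c).find? (fun i => decide ((p : Int) ≤ i)) = some ((p + q : Nat) : Int) := by
      apply pvFind?_eq_some_of _ _ (pvPosns_sorted sl c) _ hmem (by simp)
      intro y hy hPy
      obtain ⟨k, rfl, hk⟩ := (pvPosns_mem sl c y).mp hy
      have hpk : p ≤ k := by exact_mod_cast of_decide_eq_true hPy
      by_contra hlt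
      push_cast at hlt
      have hkq : k - p < q := by omega
      have hthis : ¬ [c] <+: (sl.drop p).drop (k - p) := hminp (k - p) hkq
      have h6 : (sl.drop p).drop (k - p) = sl.drop k := by
        rw [List.drop_drop]; try congr 1
        all_goals omega
      rw [h6, pvSingle_prefix, List.head?_drop] at hthis
      exact hthis hk
    rw [hfind]
    have hne : PySem.Chars.find (sl.drop p) [c] ≠ -1 := by omega
    rw [if_neg hne]
    simp only [Option.getD_some]
    push_cast
    omega
  · have h1 : PySem.Chars.find (sl.drop p) [c] = -1 := by
      rw [PySem.Chars.find_eq_neg_one_iff]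
      rw [pvSingle_infix]
      exact hc
    rw [h1, if_pos rfl]
    have : (pvPosns sl c).find? (fun i => decide ((p : Int) ≤ i)) = none := by
      rw [List.find?_eq_none]
      intro x hx
      obtain ⟨k, rfl, hk⟩ := (pvPosns_mem sl c x).mp hx
      simp only [decide_eq_true_eq, Nat.cast_le]
      intro hpk
      apply hc
      have hget : (sl.drop p)[k - p]? = some c := by
        rw [List.getElem?_drop, show p + (k - p) = k from by omega]
        exact hk
      exact List.mem_of_getElem? hget
    rw [this]
    rfl

-- the invariant A's main loop maintains over its dictionary state
def pvInv (sl : List Char) (m : PySem.Dict Char (List Int)) (M : Int) : Prop :=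
  ∀ c : Char, m.contains c = decide (c ∈ sl) ∧
    (c ∈ sl → ∃ k : Nat, m.getD c [] = (pvPosns sl c).drop k ∧ (pvPosns sl c).drop k ≠ [] ∧
       ∀ i ∈ (pvPosns sl c).take k, i ≤ M)



theorem pvHead_dropWhile_false (p : Int → Bool) (l : List Int) (j : Int) (t : List Int)
    (h : l.dropWhile p = j :: t) : p j = false := by
  have hh := List.head_dropWhile_not p (l := l) (by simp [h])
  have he : (l.dropWhile p).head (by simp [h]) = j := by simp [h]
  rw [he] at hh
  simpa using hh

theorem pvInv_init (sl : List Char) : pvInv sl (pvBuildMapA sl) 0 := by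
  intro c
  refine ⟨pvBuildMapA_contains sl c, fun hc => ⟨0, ?_, ?_, ?_⟩⟩
  · simp [pvBuildMapA_getD]
  · simpa using pvPosns_ne_nil_of_mem sl c hc
  · simp

-- the two find? predicates are the same function
theorem pvPred_eq (M : Int) :
    (fun i => decide ((M + 1 : Int) ≤ i)) = (fun i : Int => !(decide (i ≤ M))) := by
  funext i
  by_cases h : i ≤ M
  · rw [decide_eq_true h, Bool.not_true, decide_eq_false (by omega)]
  · rw [decide_eq_false h, Bool.not_false, decide_eq_true (by omega)]

-- splitting find? over pvPosns at the invariant's drop point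
theorem pvFind?_posns (sl : List Char) (c : Char) (M : Int) (k : Nat)
    (hbd : ∀ i ∈ (pvPosns sl c).take k, i ≤ M) :
    (pvPosns sl c).find? (fun i => decide ((M + 1 : Int) ≤ i))
      = (((pvPosns sl c).drop k).dropWhile (fun i => decide (i ≤ M))).head? := by
  conv_lhs => rw [← List.take_append_drop k (pvPosns sl c)]
  rw [List.find?_append]
  have h1 : ((pvPosns sl c).take k).find? (fun i => decide ((M + 1 : Int) ≤ i)) = none := by
    rw [List.find?_eq_none]
    intro x hx
    have := hbd x hx
    simp only [decide_eq_true_eq]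
    omega
  rw [h1, Option.none_or, pvPred_eq M, List.find?_eq_head?_dropWhile_not]
  simp only [Bool.not_not]

-- take/drop at the takeWhile boundary
theorem pvDrop_takeWhile (p : Int → Bool) (l : List Int) :
    l.drop (l.takeWhile p).length = l.dropWhile p := by
  induction l with
  | nil => rfl
  | cons a t ih =>
    by_cases h : p a <;> simp [List.takeWhile_cons, List.dropWhile_cons, h, ih]

theorem pvTake_takeWhile (p : Int → Bool) (l : List Int) :
    l.take (l.takeWhile p).length = l.takeWhile p :=
  ((List.prefix_iff_eq_take).mp (List.takeWhile_prefix p)).symm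

-- A's main loop, against the common greedy loop
theorem pvA_loop (sl : List Char) (f : List Char) :
    ∀ (m : PySem.Dict Char (List Int)) (acc : List Char) (M : Int),
    pvInv sl m M → 0 ≤ M → M < (sl.length : Int) →
    (f.foldl pvStepA (m, (acc, M))).2.1 = acc ++ pvSpecLoop sl f (M + 1) := by
  induction f with
  | nil => intro m acc M _ _ _; simp [pvSpecLoop]
  | cons c f ih =>
    intro m acc M hInv hM0 hMlen
    obtain ⟨hcont, hrest⟩ := hInv c
    rw [List.foldl_cons]
    have hp1 : (((M + 1).toNat : Int)) = M + 1 := by omega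
    have hple : (M + 1).toNat ≤ sl.length := by omega
    have hff : PySem.Chars.findFrom sl [c] (M + 1) none
        = ((pvPosns sl c).find? (fun i => decide ((M + 1 : Int) ≤ i))).getD (-1) := by
      rw [← hp1, pvFindFrom_eq sl c _ hple, hp1]
    by_cases hc : c ∈ sl
    · have h1 : m.contains c = true := by rw [hcont]; exact decide_eq_true hc
      obtain ⟨k, hgd, hne, hbd⟩ := hrest hc
      have hsplit := pvFind?_posns sl c M k hbd
      rcases ht : ((pvPosns sl c).drop k).dropWhile (fun i => decide (i ≤ M)) with _ | ⟨j, t'⟩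
      · -- nothing left above M: A skips the char, and so does the greedy loop
        have hr : pvScanA (m.getD c []) M
            = (-1, ((((pvPosns sl c).drop k).takeWhile (fun i => decide (i ≤ M))).length : Int)) := by
          rw [pvScanA_eq, hgd, ht]; rfl
        have happ : pvStepA (m, (acc, M)) c = (m, (acc, M)) := by
          unfold pvStepA
          simp only [h1, if_true, hr]
          rw [if_neg (by omega)]
        rw [happ]
        have hff2 : PySem.Chars.findFrom sl [c] (M + 1) none = -1 := by
          rw [hff, hsplit, ht]; rfl
        simp only [pvSpecLoop, hff2]
        rw [if_neg (by simp)]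
        exact ih m acc M hInv hM0 hMlen
      · -- a match at j, the first index-list entry above M
        have hjL : j ∈ (pvPosns sl c).drop k := by
          have hmem : j ∈ ((pvPosns sl c).drop k).dropWhile (fun i => decide (i ≤ M)) := by
            rw [ht]; exact List.mem_cons_self
          exact (List.dropWhile_sublist _).mem hmem
        have hjpos : j ∈ pvPosns sl c := List.drop_subset _ _ hjL
        have hj0 : 0 ≤ j := pvPosns_nonneg sl c j hjpos
        have hjlen : j < (sl.length : Int) := pvPosns_lt_len sl c j hjpos
        have hjM : M < j := by
          have := pvHead_dropWhile_false _ _ _ _ ht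
          simpa using this
        have hr : pvScanA (m.getD c []) M
            = (j, ((((pvPosns sl c).drop k).takeWhile (fun i => decide (i ≤ M))).length : Int)) := by
          rw [pvScanA_eq, hgd, ht]; rfl
        have hslice : PySem.List.slice (m.getD c [])
            (some ((((pvPosns sl c).drop k).takeWhile (fun i => decide (i ≤ M))).length : Int)) none
            = j :: t' := by
          rw [PySem.List.slice_from_natCast, hgd, pvDrop_takeWhile, ht]
        have happ : pvStepA (m, (acc, M)) c = (m.insert c (j :: t'), (acc ++ [c], j)) := by
          unfold pvStepA
          simp only [h1, if_true, hr]
          rw [if_pos (by exact hjM)]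
          simp only [hslice]
          rw [if_neg (by simp)]
        rw [happ]
        have hff2 : PySem.Chars.findFrom sl [c] (M + 1) none = j := by
          rw [hff, hsplit, ht]; rfl
        simp only [pvSpecLoop, hff2]
        rw [if_pos (by omega : j ≠ -1)]
        have hInv' : pvInv sl (m.insert c (j :: t')) j := by
          intro c'
          obtain ⟨hcont', hrest'⟩ := hInv c'
          constructor
          · rw [PySem.Dict.contains_insert]
            by_cases hcc : c' = c
            · subst hcc
              simp [hc]
            · have hbe : (c' == c) = false := by simp [hcc]
              rw [hbe, Bool.false_or, hcont']
          · intro hc'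
            by_cases hcc : c' = c
            · subst hcc
              refine ⟨k + (((pvPosns sl c').drop k).takeWhile (fun i => decide (i ≤ M))).length,
                ?_, ?_, ?_⟩
              · rw [PySem.Dict.getD_insert, if_pos rfl]
                have hdd : (pvPosns sl c').drop (k + (((pvPosns sl c').drop k).takeWhile
                    (fun i => decide (i ≤ M))).length)
                    = ((pvPosns sl c').drop k).drop (((pvPosns sl c').drop k).takeWhile
                    (fun i => decide (i ≤ M))).length := by
                  rw [List.drop_drop]
                  try congr 1
                  all_goals omega
                rw [hdd, pvDrop_takeWhile, ht]
              · have hdd : (pvPosns sl c').drop (k + (((pvPosns sl c').drop k).takeWhile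
                    (fun i => decide (i ≤ M))).length)
                    = ((pvPosns sl c').drop k).drop (((pvPosns sl c').drop k).takeWhile
                    (fun i => decide (i ≤ M))).length := by
                  rw [List.drop_drop]
                  try congr 1
                  all_goals omega
                rw [hdd, pvDrop_takeWhile, ht]
                simp
              · intro i hi
                rw [List.take_add] at hi
                rcases List.mem_append.mp hi with h | h
                · have := hbd i h
                  omega
                · have hiw : i ∈ ((pvPosns sl c').drop k).takeWhile (fun i => decide (i ≤ M)) := by
                    rwa [pvTake_takeWhile] at h
                  have := List.mem_takeWhile_imp hiw
                  simp only [decide_eq_true_eq] at this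
                  omega
            · obtain ⟨k', hgd', hne', hbd'⟩ := hrest' hc'
              refine ⟨k', ?_, hne', fun i hi => ?_⟩
              · rw [PySem.Dict.getD_insert, if_neg hcc, hgd']
              · have := hbd' i hi
                omega
        rw [ih (m.insert c (j :: t')) (acc ++ [c]) j hInv' hj0 hjlen]
        simp
    · have h1 : m.contains c = false := by rw [hcont]; exact decide_eq_false hc
      have happ : pvStepA (m, (acc, M)) c = (m, (acc, M)) := by
        unfold pvStepA
        simp only [h1, Bool.false_eq_true, if_false]
      rw [happ]
      have hff2 : PySem.Chars.findFrom sl [c] (M + 1) none = -1 := by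
        rw [hff, pvPosns_eq_nil_of_not_mem sl c hc]; rfl
      simp only [pvSpecLoop, hff2]
      rw [if_neg (by simp)]
      exact ih m acc M hInv hM0 hMlen


-- B's loop, against the common greedy loop
theorem pvB_loop (sl : List Char) (f : List Char) :
    ∀ (acc : List Char) (p : Int),
    (f.foldl (pvStepB sl) (acc, p)).1 = acc ++ pvSpecLoop sl f p := by
  induction f with
  | nil => intro acc p; simp [pvSpecLoop]
  | cons c f ih =>
    intro acc p
    rw [List.foldl_cons]
    by_cases h : PySem.Chars.findFrom sl [c] p none = -1
    · have happ : pvStepB sl (acc, p) c = (acc, p) := by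
        unfold pvStepB
        simp [h]
      rw [happ]
      simp only [pvSpecLoop]
      rw [if_neg (by simpa using h)]
      exact ih acc p
    · have happ : pvStepB sl (acc, p) c
          = (acc ++ [c], PySem.Chars.findFrom sl [c] p none + 1) := by
        unfold pvStepB
        simp [h]
      rw [happ]
      simp only [pvSpecLoop]
      rw [if_pos h]
      rw [ih (acc ++ [c]) (PySem.Chars.findFrom sl [c] p none + 1)]
      simp

-- with an empty second string nothing ever matches
theorem pvSpecLoop_nil_sl (f : List Char) : pvSpecLoop [] f 1 = [] := by
  induction f with
  | nil => rfl
  | cons c f ih =>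
    have h : PySem.Chars.findFrom ([] : List Char) [c] (1 : Int) none = -1 := rfl
    simp only [pvSpecLoop, h]
    rw [if_neg (by simp)]
    exact ih

theorem pvA_loop_empty (f : List Char) :
    ∀ (acc : List Char) (M : Int),
    (f.foldl pvStepA (PySem.Dict.empty, (acc, M))).2.1 = acc := by
  induction f with
  | nil => intro acc M; rfl
  | cons c f ih =>
    intro acc M
    rw [List.foldl_cons]
    have happ : pvStepA (PySem.Dict.empty, (acc, M)) c = (PySem.Dict.empty, (acc, M)) := by
      unfold pvStepA
      simp [PySem.Dict.contains_empty]
    rw [happ]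
    exact ih acc M

-- ===== VERDICT (by name: the statement is the Claim_ definition above) =====
theorem find_common_chars_spec : Claim_equal_find_common_chars := by
  unfold Claim_equal_find_common_chars
  intro f s _hDom
  unfold Spec_find_common_chars
  have hB : find_common_chars_alt f s = String.ofList (pvSpecLoop s.toList f.toList 1) := by
    show String.ofList (f.toList.foldl (pvStepB s.toList) ([], 1)).1 = _
    rw [pvB_loop s.toList f.toList [] 1]
    simp
  rcases hsl : s.toList with _ | ⟨c0, rest⟩
  · have hA : find_common_chars f s = String.ofList [] := by
      show String.ofList (f.toList.foldl pvStepA (pvBuildMapA s.toList, ([], 0))).2.1 = _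
      rw [hsl]
      have hempty : pvBuildMapA [] = PySem.Dict.empty := rfl
      rw [hempty, pvA_loop_empty]
    rw [hA, hB, hsl, pvSpecLoop_nil_sl]
  · have hA : find_common_chars f s = String.ofList (pvSpecLoop s.toList f.toList 1) := by
      show String.ofList (f.toList.foldl pvStepA (pvBuildMapA s.toList, ([], 0))).2.1 = _
      rw [pvA_loop s.toList f.toList (pvBuildMapA s.toList) [] 0 (pvInv_init s.toList) le_rfl
        (by rw [hsl]; simp only [List.length_cons]; push_cast; omega)]
      norm_num
    rw [hA, hB]
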